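-- pv_equiv track=rewrite | github.com/yangjianjian-cn/report_auto | report_auto/tools/utils/HtmlGenerator.py | generate_select_options
-- ===== SOURCE A (Python) =====
-- from collections import defaultdict
--
-- def generate_select_options(measurement_files, selected_ids=None):
--     grouped_files = defaultdict(list)
--
--     for file in measurement_files:
--         oem = file['oem']
--         grouped_files[oem].append(file)
--
--     # 初始化选中的 ID 列表
--     selected_ids = selected_ids or []
--
--     # 使用列表来存储生成的 HTML 部分
--     html_parts = ['<select id="example-multiple-optgroups" multiple="multiple" class="bg-warning" tabindex="-1">\n']
--
--     for oem, files in grouped_files.items():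
--         html_parts.append(f'    <optgroup label="{oem}">\n')
--
--         for mf in files:
--             file_id = mf['id']
--             file_name = mf['file_name']
--             # selected_attr = 'selected="selected"' if file_id in selected_ids else ''
--             # html_parts.append(f'        <option value="{file_id}" {selected_attr}>{file_name}</option>\n')
--             # selected_attr = 'selected="selected"' if file_id in selected_ids else ''
--             html_parts.append(f'        <option value="{file_id}">{file_name}</option>\n')
--
--         html_parts.append('    </optgroup>\n')
--
--     html_parts.append('</select>\n')
--
--     # 最后用 join 方法将所有部分连接起来
--     select_html = ''.join(html_parts)
--
--     return select_html
-- ===== SOURCE B (Python) =====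
-- def generate_select_options(measurement_files, selected_ids=None):
--     # Enumerate distinct OEM labels in first-appearance order, then rescan the
--     # file list once per OEM; the whole document is one nested join expression.
--     oems = dict.fromkeys(f['oem'] for f in measurement_files)
--     body = ''.join(
--         f'    <optgroup label="{oem}">\n'
--         + ''.join(f'        <option value="{mf["id"]}">{mf["file_name"]}</option>\n'
--                   for mf in measurement_files if mf['oem'] == oem)
--         + '    </optgroup>\n'
--         for oem in oems)
--     return ('<select id="example-multiple-optgroups" multiple="multiple" class="bg-warning" tabindex="-1">\n'
--             + body
--             + '</select>\n')
-- ===== Notes on version B (the rewrite author's own statement) =====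
-- stated objective: alternative
-- what changed: A groups files into a defaultdict in one pass and walks the grouped dict's items with an accumulated parts list; B instead dedups the OEM labels in first-appearance order and rescans the whole file list once per OEM, building the document as one nested join expression.
import Mathlib
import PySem

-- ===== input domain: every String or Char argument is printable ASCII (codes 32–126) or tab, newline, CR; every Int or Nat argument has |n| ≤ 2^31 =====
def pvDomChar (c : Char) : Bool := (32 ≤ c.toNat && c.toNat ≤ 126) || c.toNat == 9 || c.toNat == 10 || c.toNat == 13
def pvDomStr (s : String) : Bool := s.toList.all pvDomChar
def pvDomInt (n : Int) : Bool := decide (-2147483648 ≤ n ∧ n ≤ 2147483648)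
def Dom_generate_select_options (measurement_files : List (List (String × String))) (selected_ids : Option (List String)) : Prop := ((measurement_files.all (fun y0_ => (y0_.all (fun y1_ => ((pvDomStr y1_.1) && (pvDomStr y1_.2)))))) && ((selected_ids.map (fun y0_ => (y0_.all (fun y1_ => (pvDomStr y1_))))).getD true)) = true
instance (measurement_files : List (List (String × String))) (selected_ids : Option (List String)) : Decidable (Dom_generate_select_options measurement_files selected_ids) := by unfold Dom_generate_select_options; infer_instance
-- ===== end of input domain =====

-- B replaces A's defaultdict grouping pass by dedup-the-OEMs-then-rescan-per-OEM,
-- built as one nested join expression (objective: alternative, same exact output).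

-- shared literal pieces and the Python dict lookup f[k] (Pre_ excludes KeyError)
def pvGetKey (f : List (String × String)) (k : String) : String :=
  (PySem.Dict.mk f).getD k ""
def pvHeader : String := "<select id=\"example-multiple-optgroups\" multiple=\"multiple\" class=\"bg-warning\" tabindex=\"-1\">\n"
def pvOptgroupOpen (oem : String) : String := "    <optgroup label=\"" ++ oem ++ "\">\n"
def pvOptgroupClose : String := "    </optgroup>\n"
def pvFooter : String := "</select>\n"
def pvOptionLine (mf : List (String × String)) : String :=
  "        <option value=\"" ++ pvGetKey mf "id" ++ "\">" ++ pvGetKey mf "file_name" ++ "</option>\n"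

-- ===== PORT A =====
def generate_select_options (measurement_files : List (List (String × String))) (selected_ids : Option (List String)) : String :=
  let grouped_files : PySem.Dict String (List (List (String × String))) :=
    measurement_files.foldl
      (fun d file => d.modify (pvGetKey file "oem") [] (fun fs => fs ++ [file]))
      PySem.Dict.empty
  -- 'selected_ids = selected_ids or []' : selected_ids is never used afterwards
  let _ := selected_ids
  let html_parts : List String := [pvHeader]
  let html_parts := grouped_files.items.foldl
    (fun parts p =>
      let parts := parts ++ [pvOptgroupOpen p.1]
      let parts := p.2.foldl (fun parts mf => parts ++ [pvOptionLine mf]) parts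
      parts ++ [pvOptgroupClose])
    html_parts
  let html_parts := html_parts ++ [pvFooter]
  PySem.Str.join "" html_parts

-- ===== PORT B =====
def generate_select_options_alt (measurement_files : List (List (String × String))) (selected_ids : Option (List String)) : String :=
  let _ := selected_ids
  let oems := PySem.List.dedup (measurement_files.map (fun f => pvGetKey f "oem"))
  let body := PySem.Str.join "" (oems.map (fun oem =>
    pvOptgroupOpen oem
    ++ PySem.Str.join ""
        ((measurement_files.filter (fun mf => pvGetKey mf "oem" == oem)).map pvOptionLine)
    ++ pvOptgroupClose))
  pvHeader ++ body ++ pvFooter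

-- ===== PRECONDITION & SPEC =====
-- Pre_ excludes exactly the inputs where Python A raises KeyError: some file dict
-- lacks one of the keys 'oem', 'id', 'file_name' (B raises there too).
def Pre_generate_select_options (measurement_files : List (List (String × String))) (selected_ids : Option (List String)) : Prop :=
  ∀ f ∈ measurement_files,
    (PySem.Dict.mk f).contains "oem" = true ∧
    (PySem.Dict.mk f).contains "id" = true ∧
    (PySem.Dict.mk f).contains "file_name" = true
instance (measurement_files : List (List (String × String))) (selected_ids : Option (List String)) : Decidable (Pre_generate_select_options measurement_files selected_ids) := by unfold Pre_generate_select_options; infer_instance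
def pvWitness_generate_select_options : (List (List (String × String))) × Option (List String) :=
  ([[("oem", "VW"), ("id", "1"), ("file_name", "a.dat")],
    [("oem", "BMW"), ("id", "2"), ("file_name", "b.dat")],
    [("oem", "VW"), ("id", "3"), ("file_name", "c.dat")]], some ["1"])

def Spec_generate_select_options (measurement_files : List (List (String × String))) (selected_ids : Option (List String)) (out : String) : Prop := out = generate_select_options_alt measurement_files selected_ids
instance (measurement_files : List (List (String × String))) (selected_ids : Option (List String)) (out : String) : Decidable (Spec_generate_select_options measurement_files selected_ids out) := by unfold Spec_generate_select_options; infer_instance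

-- ===== CLAIM (what is proved, stated in full; the proofs are below) =====
def Claim_equal_generate_select_options : Prop := ∀ (measurement_files : List (List (String × String))) (selected_ids : Option (List String)), Dom_generate_select_options measurement_files selected_ids → Pre_generate_select_options measurement_files selected_ids → Spec_generate_select_options measurement_files selected_ids (generate_select_options measurement_files selected_ids)

-- ===== LEMMAS AND PROOFS =====

theorem pv_inter_nil : ∀ (l : List (List Char)), (List.intersperse ([] : List Char) l).flatten = l.flatten
  | [] => rfl
  | [_] => rfl
  | a :: b :: t => by simp [List.intersperse, pv_inter_nil (b :: t)]

theorem pv_joinE (l : List String) :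
    PySem.Str.join "" l = String.ofList ((l.map String.toList).flatten) := by
  simp [PySem.Str.join, PySem.Chars.join, List.intercalate, pv_inter_nil]

theorem pv_join_append (a b : List String) :
    PySem.Str.join "" (a ++ b) = PySem.Str.join "" a ++ PySem.Str.join "" b := by
  simp [pv_joinE, String.ofList_append]

theorem pv_join_singleton (x : String) : PySem.Str.join "" [x] = x := by
  simp [pv_joinE, String.ofList_toList]

theorem pv_join_cons (x : String) (l : List String) :
    PySem.Str.join "" (x :: l) = x ++ PySem.Str.join "" l := by
  rw [show x :: l = [x] ++ l from rfl, pv_join_append, pv_join_singleton]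

theorem pv_join_nil : PySem.Str.join "" ([] : List String) = "" := rfl

theorem pv_grouped_eq (mf : List (List (String × String))) :
    mf.foldl (fun d file => d.modify (pvGetKey file "oem") [] (fun fs => fs ++ [file])) PySem.Dict.empty
    = (mf.map (fun f => (pvGetKey f "oem", f))).foldl
        (fun d p => d.modify p.1 [] (fun fs => fs ++ [p.2])) PySem.Dict.empty := by
  rw [List.foldl_map]

theorem pv_main (grp : String → List (List (String × String))) (oems : List String) :
    PySem.Str.join "" (oems.flatMap (fun k =>
        pvOptgroupOpen k :: ((grp k).map pvOptionLine ++ [pvOptgroupClose])))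
    = PySem.Str.join "" (oems.map (fun k =>
        pvOptgroupOpen k ++ (PySem.Str.join "" ((grp k).map pvOptionLine) ++ pvOptgroupClose))) := by
  induction oems with
  | nil => rfl
  | cons a t ih =>
      simp only [List.flatMap_cons, List.map_cons,
        pv_join_cons, pv_join_append, pv_join_nil, ih, String.empty_append, String.append_assoc]

-- ===== VERDICT (by name: the statement is the Claim_ definition above) =====
theorem generate_select_options_spec : Claim_equal_generate_select_options := by
  intro mf sel _ _
  unfold Spec_generate_select_options generate_select_options generate_select_options_alt
  dsimp only
  rw [pv_grouped_eq]
  have hnd : ((mf.map (fun f => (pvGetKey f "oem", f))).foldl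
      (fun d p => d.modify p.1 [] (fun fs => fs ++ [p.2])) PySem.Dict.empty).keys.Nodup := by
    exact PySem.Dict.nodup_keys_foldl_modify_key _ _ _ _ _ PySem.Dict.nodup_keys_empty
  have hkeys : ((mf.map (fun f => (pvGetKey f "oem", f))).foldl
      (fun d p => d.modify p.1 [] (fun fs => fs ++ [p.2])) PySem.Dict.empty).keys
      = PySem.List.dedup (mf.map (fun f => pvGetKey f "oem")) := by
    rw [PySem.Dict.keys_foldl_modify_key]
    simp [PySem.Dict.keys_empty, PySem.Set.update, PySem.Set.ofList,
      PySem.List.dedup, List.map_map, Function.comp_def]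
  have hgetD : ∀ c, ((mf.map (fun f => (pvGetKey f "oem", f))).foldl
      (fun d p => d.modify p.1 [] (fun fs => fs ++ [p.2])) PySem.Dict.empty).getD c []
      = mf.filter (fun f => pvGetKey f "oem" == c) := by
    intro c
    rw [PySem.Dict.getD_foldl_modify_append]
    simp [PySem.Dict.getD_empty, List.filter_map, List.map_map, Function.comp_def]
  rw [PySem.Dict.items_eq_map_keys _ hnd [], hkeys]
  simp only [PySem.List.foldl_append_singleton_eq_map, List.append_assoc]
  rw [PySem.List.foldl_append_eq_flatMap, List.flatMap_map]
  dsimp only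
  simp only [hgetD]
  simp only [List.singleton_append, pv_join_cons, pv_join_append,
    pv_join_nil, String.append_empty, String.append_assoc]
  rw [pv_main (fun k => mf.filter (fun f => pvGetKey f "oem" == k))]
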